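-- pv_equiv track=rewrite | github.com/nicmcd/sstraffic | multiapp.py | sequential_placement
-- ===== SOURCE A (Python) =====
-- def sequential_placement(nodes, apps):
--   nodecounts = [nodes // apps] * apps
--   for app in range(apps):
--     if sum(nodecounts) == nodes:
--       break
--     nodecounts[app] += 1
--   nodesets = [set() for _ in range(apps)]
--   app = 0
--   for node in range(nodes):
--     nodesets[app].add(node)
--     if len(nodesets[app]) == nodecounts[app]:
--       app += 1
--   return nodesets
-- ===== SOURCE B (Python) =====
-- def sequential_placement(nodes, apps):
--   base, rem = divmod(nodes, apps)
--   cutoff = rem * (base + 1)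
--   nodesets = [set() for _ in range(apps)]
--   for node in range(nodes):
--     app = node // (base + 1) if node < cutoff else rem + (node - cutoff) // base
--     nodesets[app].add(node)
--   return nodesets
-- ===== Notes on version B (the rewrite author's own statement) =====
-- stated objective: faster
-- what changed: replaces A's incremental top-up loop (which re-sums the counts list every iteration, O(apps^2)) and stateful advancing app pointer with one divmod and a stateless closed-form app index computed per node
import Mathlib
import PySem

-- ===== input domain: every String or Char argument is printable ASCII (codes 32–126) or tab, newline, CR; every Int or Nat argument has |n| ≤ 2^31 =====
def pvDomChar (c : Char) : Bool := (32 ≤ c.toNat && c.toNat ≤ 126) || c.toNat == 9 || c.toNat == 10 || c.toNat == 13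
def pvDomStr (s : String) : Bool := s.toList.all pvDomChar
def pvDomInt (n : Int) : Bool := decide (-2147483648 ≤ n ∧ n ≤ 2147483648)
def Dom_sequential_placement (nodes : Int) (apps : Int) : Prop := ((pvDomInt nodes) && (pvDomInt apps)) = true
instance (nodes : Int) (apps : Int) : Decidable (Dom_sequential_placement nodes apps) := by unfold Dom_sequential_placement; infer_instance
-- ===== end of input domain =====

-- B replaces A's quadratic top-up loop and stateful advancing app pointer with one divmod and a
-- stateless closed-form app index per node (objective: faster; raises exactly where A raises).

-- ===== PORT A =====
-- 'for app in range(apps): if sum(nodecounts) == nodes: break; nodecounts[app] += 1'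
def pvBump (nodes : Int) : List Int → List Int → List Int
  | [], counts => counts
  | a :: rest, counts =>
    if counts.sum = nodes then counts
    else pvBump nodes rest (counts.modify a.toNat (· + 1))

-- 'for node in range(nodes): nodesets[app].add(node); if len(nodesets[app]) == nodecounts[app]: app += 1'
def pvFill (counts : List Int) : List Int → List (List Int) → Int → List (List Int)
  | [], sets, _ => sets
  | n :: rest, sets, app =>
    let sets' := PySem.List.pySetD sets app (PySem.Set.add (PySem.List.pyGetD sets app []) n)
    if ((PySem.List.pyGetD sets' app []).length : Int) = PySem.List.pyGetD counts app 0
    then pvFill counts rest sets' (app + 1)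
    else pvFill counts rest sets' app

def sequential_placement (nodes : Int) (apps : Int) : List (List Int) :=
  let counts0 := List.replicate apps.toNat (PySem.Int.floordiv nodes apps)
  let counts := pvBump nodes (PySem.List.pyRange 0 apps 1) counts0
  let sets0 := (PySem.List.pyRange 0 apps 1).map (fun _ => ([] : List Int))
  pvFill counts (PySem.List.pyRange 0 nodes 1) sets0 0

-- ===== PORT B =====
-- 'app = node // (base+1) if node < cutoff else rem + (node - cutoff) // base'
-- (the 'else' division is reached only with base ≠ 0 on inputs admitted by Pre_)
def pvAppOf (base rem cutoff : Int) (node : Int) : Int :=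
  if node < cutoff then PySem.Int.floordiv node (base + 1)
  else rem + PySem.Int.floordiv (node - cutoff) base

-- 'for node in range(nodes): nodesets[app].add(node)'
-- (nodesets[app] via pyGetD/pySetD: exact since app is in range on every input Pre_ admits)
def pvPlace (base rem cutoff : Int) : List Int → List (List Int) → List (List Int)
  | [], sets => sets
  | n :: rest, sets =>
    let app := pvAppOf base rem cutoff n
    pvPlace base rem cutoff rest
      (PySem.List.pySetD sets app (PySem.Set.add (PySem.List.pyGetD sets app []) n))

def sequential_placement_alt (nodes : Int) (apps : Int) : List (List Int) :=
  match PySem.Int.divmod? nodes apps with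
  | none => []   -- unreachable under Pre_: Python B raises ZeroDivisionError when apps = 0
  | some (base, rem) =>
    let cutoff := rem * (base + 1)
    let sets0 := (PySem.List.pyRange 0 apps 1).map (fun _ => ([] : List Int))
    pvPlace base rem cutoff (PySem.List.pyRange 0 nodes 1) sets0

-- ===== PRECONDITION & SPEC =====
-- Pre_ excludes exactly the inputs where the Python A raises (and B raises too): apps = 0
-- (ZeroDivisionError) and apps < 0 with nodes > 0 (IndexError on an empty nodesets list).
def Pre_sequential_placement (nodes : Int) (apps : Int) : Prop :=
  0 < apps ∨ (apps < 0 ∧ nodes ≤ 0)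
instance (nodes : Int) (apps : Int) : Decidable (Pre_sequential_placement nodes apps) := by
  unfold Pre_sequential_placement; infer_instance

def pvWitness_sequential_placement : Int × Int := (7, 3)

def Spec_sequential_placement (nodes : Int) (apps : Int) (out : List (List Int)) : Prop :=
  out = sequential_placement_alt nodes apps
instance (nodes : Int) (apps : Int) (out : List (List Int)) : Decidable (Spec_sequential_placement nodes apps out) := by
  unfold Spec_sequential_placement; infer_instance

-- ===== CLAIM (what is proved, stated in full; the proofs are below) =====
def Claim_equal_sequential_placement : Prop := ∀ (nodes : Int) (apps : Int), Dom_sequential_placement nodes apps → Pre_sequential_placement nodes apps → Spec_sequential_placement nodes apps (sequential_placement nodes apps)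

-- ===== LEMMAS AND PROOFS =====

-- the contiguous segments of given lengths starting at a given offset
def pvSegs : List Int → Int → List (List Int)
  | [], _ => []
  | c :: cs, off => PySem.List.pyRange off (off + c) 1 :: pvSegs cs (off + c)

theorem pvSegs_nonpos (cs : List Int) (h : ∀ c ∈ cs, c ≤ 0) (off : Int) :
    pvSegs cs off = List.replicate cs.length [] := by
  induction cs generalizing off with
  | nil => simp [pvSegs]
  | cons c cs ih =>
    have hc : c ≤ 0 := h c (by simp)
    simp [pvSegs, PySem.List.pyRange_one_eq_nil (by omega : off + c ≤ off), List.replicate_succ,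
      ih (fun d hd => h d (by simp [hd])) (off + c)]

theorem pvBump_done (nodes : Int) (l counts : List Int) (h : counts.sum = nodes) :
    pvBump nodes l counts = counts := by
  cases l with
  | nil => rfl
  | cons a rest => simp [pvBump, h]

theorem pv_sum_rep (x y : Int) (j k : Nat) :
    (List.replicate j x ++ List.replicate k y).sum = j * x + k * y := by
  simp [List.sum_replicate]

theorem pv_modify_rep (x y : Int) (j k : Nat) :
    (List.replicate j x ++ y :: List.replicate k y).modify j (· + 1)
    = List.replicate j x ++ (y + 1) :: List.replicate k y := by
  induction j with
  | zero => simp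
  | succ n ih => simpa [List.replicate_succ] using ih

theorem pvBump_spec (nodes apps base : Int) (hpos : 0 < apps)
    (rem : Int) (hrem0 : 0 ≤ rem) (hrem1 : rem < apps)
    (hsum : apps * base + rem = nodes) :
    ∀ (j : Nat), (j : Int) ≤ rem →
      pvBump nodes (PySem.List.pyRange (j : Int) apps 1)
        (List.replicate j (base + 1) ++ List.replicate (apps.toNat - j) base)
      = List.replicate rem.toNat (base + 1) ++ List.replicate (apps.toNat - rem.toNat) base := by
  suffices H : ∀ (k j : Nat), rem.toNat - j = k → (j : Int) ≤ rem →
      pvBump nodes (PySem.List.pyRange (j : Int) apps 1)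
        (List.replicate j (base + 1) ++ List.replicate (apps.toNat - j) base)
      = List.replicate rem.toNat (base + 1) ++ List.replicate (apps.toNat - rem.toNat) base by
    intro j hj; exact H (rem.toNat - j) j rfl hj
  intro k
  induction k with
  | zero =>
    intro j hk hj
    have hj' : j = rem.toNat := by omega
    subst hj'
    apply pvBump_done
    rw [pv_sum_rep]
    have h1 : ((rem.toNat : Nat) : Int) = rem := by omega
    have h2 : ((apps.toNat - rem.toNat : Nat) : Int) = apps - rem := by omega
    rw [h1, h2]; linear_combination hsum
  | succ k ih =>
    intro j hk hj
    have hja : (j : Int) < apps := by omega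
    rw [PySem.List.pyRange_one_cons hja]
    have hsplit : apps.toNat - j = (apps.toNat - (j + 1)) + 1 := by omega
    rw [pvBump]
    have hsumne : (List.replicate j (base + 1) ++ List.replicate (apps.toNat - j) base).sum ≠ nodes := by
      rw [pv_sum_rep]
      have h2 : ((apps.toNat - j : Nat) : Int) = apps - j := by omega
      rw [h2]
      intro h
      have : (j : Int) = rem := by linear_combination h - hsum
      omega
    rw [if_neg hsumne]
    have htoNat : ((j : Int)).toNat = j := by omega
    rw [htoNat, hsplit, List.replicate_succ, pv_modify_rep]
    have : List.replicate j (base + 1) ++ (base + 1) :: List.replicate (apps.toNat - (j + 1)) base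
        = List.replicate (j + 1) (base + 1) ++ List.replicate (apps.toNat - (j + 1)) base := by
      rw [List.replicate_succ']; simp
    rw [this]
    exact_mod_cast ih (j + 1) (by omega) (by omega)

theorem pv_getD_mid {α : Type} [Inhabited α] (done tail : List α) (x : α) (d : α) :
    (done ++ x :: tail).getD done.length d = x := by
  simp [List.getD]

theorem pv_set_mid {α : Type} (done tail : List α) (x v : α) :
    (done ++ x :: tail).set done.length v = done ++ v :: tail := by
  rw [List.set_append_right _ _ (le_refl done.length)]
  simp

theorem pv_add_range (b s : Int) (h : b ≤ s) :
    PySem.Set.add (PySem.List.pyRange b s 1) s = PySem.List.pyRange b (s + 1) 1 := by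
  have hmem : s ∉ PySem.List.pyRange b s 1 := by
    simp [PySem.List.mem_pyRange_one]
  rw [PySem.List.pyRange_one_succ_right h]
  simp [PySem.Set.add, PySem.Set.contains]

theorem pvFill_seg : ∀ (m : Nat) (counts : List Int) (done tail : List (List Int)) (b s : Int)
    (more : List Int), b ≤ s → 0 < m →
    PySem.List.pyGetD counts ((done.length : Int)) 0 = s + m - b →
    pvFill counts (PySem.List.pyRange s (s + m) 1 ++ more) (done ++ PySem.List.pyRange b s 1 :: tail) (done.length : Int)
    = pvFill counts more (done ++ PySem.List.pyRange b (s + m) 1 :: tail) ((done.length : Int) + 1) := by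
  intro m
  induction m with
  | zero => omega
  | succ k ih =>
    intro counts done tail b s more hb _ hcnt
    have hcons : PySem.List.pyRange s (s + (k + 1 : Nat)) 1 = s :: PySem.List.pyRange (s + 1) (s + (k + 1 : Nat)) 1 :=
      PySem.List.pyRange_one_cons (by push_cast; omega)
    rw [hcons]
    show pvFill counts (s :: (PySem.List.pyRange (s+1) (s + (k+1:Nat)) 1 ++ more)) _ _ = _
    rw [pvFill]
    simp only [PySem.List.pyGetD_natCast, PySem.List.pySetD_natCast, pv_getD_mid, pv_set_mid,
      pv_add_range b s hb]
    simp only [PySem.List.pyGetD_natCast] at hcnt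
    have hlen : ((PySem.List.pyRange b (s + 1) 1).length : Int) = s + 1 - b := by
      rw [PySem.List.length_pyRange_one]; omega
    rw [hlen, hcnt]
    by_cases hk : k = 0
    · subst hk
      rw [if_pos (by push_cast; ring)]
      simp [PySem.List.pyRange_one_eq_nil (le_refl (s+1))]
    · rw [if_neg (by push_cast; omega)]
      have := ih counts done tail b (s + 1) more (by omega) (by omega)
        (by simp only [PySem.List.pyGetD_natCast]; rw [hcnt]; push_cast; ring)
      have harg : s + 1 + (k : Int) = s + ((k:Nat) + 1 : Nat) := by push_cast; ring
      rw [harg] at this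
      exact this

theorem pvFill_main : ∀ (pos : List Int) (counts : List Int) (done : List (List Int)) (zeros : List Int) (s : Int),
    (∀ c ∈ pos, 0 < c) → (∀ c ∈ zeros, c = 0) →
    counts.drop done.length = pos ++ zeros →
    pvFill counts (PySem.List.pyRange s (s + pos.sum) 1)
      (done ++ List.replicate (pos ++ zeros).length []) (done.length : Int)
    = done ++ pvSegs (pos ++ zeros) s := by
  intro pos
  induction pos with
  | nil =>
    intro counts done zeros s _ hz _
    rw [show s + ([] : List Int).sum = s by simp, PySem.List.pyRange_one_eq_nil (le_refl s)]
    simp [pvFill, pvSegs_nonpos zeros (fun c hc => le_of_eq (hz c hc)) s]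
  | cons c pos' ih =>
    intro counts done zeros s hp hz hdrop
    have hc : 0 < c := hp c (by simp)
    have hsum' : 0 ≤ pos'.sum := List.sum_nonneg (fun x hx => le_of_lt (hp x (by simp [hx])))
    have hsplit : PySem.List.pyRange s (s + (c :: pos').sum) 1
        = PySem.List.pyRange s (s + c) 1 ++ PySem.List.pyRange (s + c) (s + (c :: pos').sum) 1 := by
      apply PySem.List.pyRange_one_append <;> simp <;> omega
    have hget : counts[done.length]? = some c := by
      have h0 := List.getElem?_drop (xs := counts) (i := done.length) (j := 0)
      rw [hdrop] at h0
      simpa using h0.symm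
    have hrep : List.replicate ((c :: pos' ++ zeros)).length ([] : List Int)
        = PySem.List.pyRange s s 1 :: List.replicate ((pos' ++ zeros)).length [] := by
      rw [PySem.List.pyRange_one_eq_nil (le_refl s)]; rfl
    rw [hsplit, hrep]
    have hseg := pvFill_seg c.toNat counts done (List.replicate (pos' ++ zeros).length []) s s
      (PySem.List.pyRange (s + c) (s + (c :: pos').sum) 1) (le_refl s) (by omega)
      (by simp [PySem.List.pyGetD_natCast, List.getD, hget]; omega)
    rw [show s + (c.toNat : Int) = s + c by omega] at hseg
    rw [hseg]
    have hlen : (done ++ [PySem.List.pyRange s (s + c) 1]).length = done.length + 1 := by simp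
    have ih' := ih counts (done ++ [PySem.List.pyRange s (s + c) 1]) zeros (s + c)
      (fun x hx => hp x (by simp [hx])) hz
      (by rw [hlen, ← List.drop_drop, hdrop]; rfl)
    rw [hlen] at ih'
    rw [show s + c + pos'.sum = s + (c :: pos').sum by simp; ring] at ih'
    rw [show ((done.length : Int) + 1) = ((done.length + 1 : Nat) : Int) by push_cast; ring]
    rw [show done ++ PySem.List.pyRange s (s + c) 1 :: List.replicate (pos' ++ zeros).length []
        = (done ++ [PySem.List.pyRange s (s + c) 1]) ++ List.replicate (pos' ++ zeros).length [] by simp]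
    rw [ih']
    simp [pvSegs]

-- B-side: 'every node of [s, s+c_j) gets app index i+j', stated per remaining counts list
def pvSegOK (f : Int → Int) : List Int → Int → Int → Prop
  | [], _, _ => True
  | c :: cs, s, i => (∀ n, s ≤ n → n < s + c → f n = i) ∧ pvSegOK f cs (s + c) (i + 1)

theorem pvPlace_seg (base rem cutoff : Int) : ∀ (m : Nat) (done tail : List (List Int)) (b s : Int)
    (more : List Int), b ≤ s →
    (∀ n, s ≤ n → n < s + m → pvAppOf base rem cutoff n = (done.length : Int)) →
    pvPlace base rem cutoff (PySem.List.pyRange s (s + m) 1 ++ more) (done ++ PySem.List.pyRange b s 1 :: tail)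
    = pvPlace base rem cutoff more (done ++ PySem.List.pyRange b (s + m) 1 :: tail) := by
  intro m
  induction m with
  | zero =>
    intro done tail b s more _ _
    rw [show s + ((0:Nat):Int) = s by simp, PySem.List.pyRange_one_eq_nil (le_refl s)]
    simp
  | succ k ih =>
    intro done tail b s more hb hf
    have hcons : PySem.List.pyRange s (s + (k + 1 : Nat)) 1 = s :: PySem.List.pyRange (s + 1) (s + (k + 1 : Nat)) 1 :=
      PySem.List.pyRange_one_cons (by push_cast; omega)
    rw [hcons]
    show pvPlace base rem cutoff (s :: (PySem.List.pyRange (s+1) (s + (k+1:Nat)) 1 ++ more)) _ = _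
    rw [pvPlace]
    rw [hf s (le_refl s) (by push_cast; omega)]
    simp only [PySem.List.pyGetD_natCast, PySem.List.pySetD_natCast, pv_getD_mid, pv_set_mid,
      pv_add_range b s hb]
    have := ih done tail b (s + 1) more (by omega)
      (fun n h1 h2 => hf n (by omega) (by push_cast at h2 ⊢; omega))
    rw [show s + 1 + ((k:Nat):Int) = s + ((k + 1 : Nat) : Int) by push_cast; ring] at this
    exact this

theorem pvPlace_main (base rem cutoff : Int) : ∀ (cs : List Int) (done : List (List Int)) (s : Int),
    (∀ c ∈ cs, 0 ≤ c) →
    pvSegOK (pvAppOf base rem cutoff) cs s (done.length : Int) →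
    pvPlace base rem cutoff (PySem.List.pyRange s (s + cs.sum) 1) (done ++ List.replicate cs.length [])
    = done ++ pvSegs cs s := by
  intro cs
  induction cs with
  | nil =>
    intro done s _ _
    rw [show s + ([] : List Int).sum = s by simp, PySem.List.pyRange_one_eq_nil (le_refl s)]
    simp [pvPlace, pvSegs]
  | cons c cs' ih =>
    intro done s hnn hok
    have hc : 0 ≤ c := hnn c (by simp)
    have hsum' : 0 ≤ cs'.sum := List.sum_nonneg (fun x hx => hnn x (by simp [hx]))
    have hsplit : PySem.List.pyRange s (s + (c :: cs').sum) 1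
        = PySem.List.pyRange s (s + c) 1 ++ PySem.List.pyRange (s + c) (s + (c :: cs').sum) 1 := by
      apply PySem.List.pyRange_one_append <;> simp <;> omega
    have hrep : List.replicate ((c :: cs')).length ([] : List Int)
        = PySem.List.pyRange s s 1 :: List.replicate cs'.length [] := by
      rw [PySem.List.pyRange_one_eq_nil (le_refl s)]; rfl
    rw [hsplit, hrep]
    have hseg := pvPlace_seg base rem cutoff c.toNat done (List.replicate cs'.length []) s s
      (PySem.List.pyRange (s + c) (s + (c :: cs').sum) 1) (le_refl s)
      (fun n h1 h2 => hok.1 n h1 (by omega))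
    rw [show s + (c.toNat : Int) = s + c by omega] at hseg
    rw [hseg]
    have hlen : (done ++ [PySem.List.pyRange s (s + c) 1]).length = done.length + 1 := by simp
    have ih' := ih (done ++ [PySem.List.pyRange s (s + c) 1]) (s + c)
      (fun x hx => hnn x (by simp [hx]))
      (by rw [hlen]; push_cast; exact hok.2)
    rw [show s + c + cs'.sum = s + (c :: cs').sum by simp; ring] at ih'
    rw [show done ++ PySem.List.pyRange s (s + c) 1 :: List.replicate cs'.length []
        = (done ++ [PySem.List.pyRange s (s + c) 1]) ++ List.replicate cs'.length [] by simp]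
    rw [ih']
    simp [pvSegs]

theorem pv_floordiv_eq (n d q : Int) (hd : 0 < d) (h1 : q * d ≤ n) (h2 : n < (q + 1) * d) :
    PySem.Int.floordiv n d = q :=
  (PySem.Int.floordiv_eq_iff_of_pos hd).mpr ⟨h1, h2⟩

theorem pvSegOK_replicate (f : Int → Int) (c : Int) : ∀ (k : Nat) (s i : Int),
    (∀ (j : Nat), j < k → ∀ n, s + j * c ≤ n → n < s + (j + 1) * c → f n = i + j) →
    pvSegOK f (List.replicate k c) s i := by
  intro k
  induction k with
  | zero => intro s i _; trivial
  | succ m ih =>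
    intro s i h
    refine ⟨fun n h1 h2 => by simpa using h 0 (by omega) n (by simpa using h1) (by simpa using h2), ?_⟩
    exact ih (s + c) (i + 1) (fun j hj n h1 h2 => by
      have e1 : s + (((j:Int)) + 1) * c = s + c + (j:Int) * c := by ring
      have e2 : s + ((((j:Int)) + 1) + 1) * c = s + c + ((j:Int) + 1) * c := by ring
      have := h (j + 1) (by omega) n (by push_cast; rw [e1]; exact h1) (by push_cast; rw [e2]; exact h2)
      rw [this]; push_cast; ring)

theorem pvSegOK_append (f : Int → Int) (cs1 cs2 : List Int) : ∀ (s i : Int),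
    pvSegOK f cs1 s i → pvSegOK f cs2 (s + cs1.sum) (i + cs1.length) →
    pvSegOK f (cs1 ++ cs2) s i := by
  induction cs1 with
  | nil => intro s i _ h2; simpa using h2
  | cons c cs ih =>
    intro s i h1 h2
    refine ⟨h1.1, ih (s + c) (i + 1) h1.2 ?_⟩
    have : s + c + cs.sum = s + (c :: cs).sum := by simp; ring
    rw [this]
    have : i + 1 + (cs.length : Int) = i + ((c :: cs).length : Int) := by simp; ring
    rw [this]
    exact h2

-- ===== VERDICT (by name: the statement is the Claim_ definition above) =====
theorem sequential_placement_spec : Claim_equal_sequential_placement := by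
  intro nodes apps _ hpre
  show sequential_placement nodes apps = sequential_placement_alt nodes apps
  rcases hpre with hpos | ⟨hneg, hn0⟩
  · -- apps > 0
    set base := PySem.Int.floordiv nodes apps with hbase
    set rem := PySem.Int.mod nodes apps with hrem
    have hb : base * apps + rem = nodes := PySem.Int.floordiv_mul_add_mod nodes apps
    have hr0 : 0 ≤ rem := PySem.Int.mod_nonneg nodes hpos
    have hr1 : rem < apps := PySem.Int.mod_lt nodes hpos
    have hdm : PySem.Int.divmod? nodes apps = some (base, rem) := by
      simp [PySem.Int.divmod?, hpos.ne', PySem.Int.floordiv, PySem.Int.mod, hbase, hrem]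
    have hcounts : pvBump nodes (PySem.List.pyRange 0 apps 1) (List.replicate apps.toNat base)
        = List.replicate rem.toNat (base + 1) ++ List.replicate (apps.toNat - rem.toNat) base := by
      have := pvBump_spec nodes apps base hpos rem hr0 hr1 (by linarith [hb]) 0 (by exact_mod_cast hr0)
      simpa using this
    set C := List.replicate rem.toNat (base + 1) ++ List.replicate (apps.toNat - rem.toNat) base with hC
    have hClen : C.length = apps.toNat := by simp [hC]; omega
    have hsets0 : (PySem.List.pyRange 0 apps 1).map (fun _ => ([] : List Int))
        = List.replicate apps.toNat ([] : List Int) := by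
      rw [List.map_const', PySem.List.length_pyRange_one]
      congr 1; omega
    set cutoff := rem * (base + 1) with hcut
    by_cases hn : 0 ≤ nodes
    · have hb0 : 0 ≤ base := by
        by_contra hlt; rw [not_le] at hlt; nlinarith
      have hCsum : C.sum = nodes := by
        rw [hC, pv_sum_rep]
        have h1 : ((rem.toNat : Nat) : Int) = rem := by omega
        have h2 : ((apps.toNat - rem.toNat : Nat) : Int) = apps - rem := by omega
        rw [h1, h2]; linear_combination hb
      -- B side: closed-form index sends segment j's nodes to app j
      have hok : pvSegOK (pvAppOf base rem cutoff) C 0 0 := by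
        rw [hC]
        apply pvSegOK_append
        · apply pvSegOK_replicate
          intro j hj n h1 h2
          have hjr : (j : Int) < rem := by omega
          have hlt : n < cutoff := by
            rw [hcut]; push_cast at h2; nlinarith
          rw [pvAppOf, if_pos hlt, pv_floordiv_eq n (base + 1) j (by omega)
            (by linarith) (by linarith)]
          ring
        · apply pvSegOK_replicate
          intro j hj n h1 h2
          simp only [List.sum_replicate, List.length_replicate, nsmul_eq_mul] at h1 h2 ⊢
          rw [Int.toNat_of_nonneg hr0] at h1 h2 ⊢
          rcases lt_or_eq_of_le hb0 with hbpos | hbz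
          · have hge : ¬ n < cutoff := by
              rw [hcut]; nlinarith
            rw [pvAppOf, if_neg hge, pv_floordiv_eq (n - cutoff) base j hbpos
              (by rw [hcut]; nlinarith) (by rw [hcut]; nlinarith)]
            ring
          · exfalso; rw [← hbz] at h1 h2; simp at h1 h2; omega
      have hBside : sequential_placement_alt nodes apps = pvSegs C 0 := by
        unfold sequential_placement_alt
        rw [hdm]
        show pvPlace base rem (rem * (base + 1)) (PySem.List.pyRange 0 nodes 1)
          ((PySem.List.pyRange 0 apps 1).map (fun _ => ([] : List Int))) = pvSegs C 0
        rw [hsets0, ← hClen, ← hcut]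
        have := pvPlace_main base rem cutoff C [] 0
          (by intro c hcm; rw [hC] at hcm
              rcases List.mem_append.mp hcm with h | h <;>
                · have := List.eq_of_mem_replicate h; omega)
          (by simpa using hok)
        simpa [hCsum] using this
      -- A side
      show pvFill (pvBump nodes (PySem.List.pyRange 0 apps 1) (List.replicate apps.toNat base))
        (PySem.List.pyRange 0 nodes 1) ((PySem.List.pyRange 0 apps 1).map (fun _ => ([] : List Int))) 0
        = sequential_placement_alt nodes apps
      rw [hcounts, hsets0, hBside]
      rcases lt_or_eq_of_le hb0 with hbpos | hbz
      · have hp : ∀ c ∈ C, 0 < c := by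
          intro c hcm
          rw [hC] at hcm
          rcases List.mem_append.mp hcm with h | h <;>
            · have := List.eq_of_mem_replicate h; omega
        have := pvFill_main C C [] [] 0 hp (by simp) (by simp)
        simpa [hCsum, hClen] using this
      · -- base = 0 : counts are rem ones then zeros
        have hCz : C = List.replicate rem.toNat (1 : Int) ++ List.replicate (apps.toNat - rem.toNat) (0 : Int) := by
          rw [hC, ← hbz]; norm_num
        have hsum1 : (List.replicate rem.toNat (1 : Int)).sum = nodes := by
          rw [List.sum_replicate, nsmul_eq_mul, mul_one]
          have hrn : rem = nodes := by rw [← hbz] at hb; linarith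
          omega
        have := pvFill_main (List.replicate rem.toNat (1 : Int)) C []
          (List.replicate (apps.toNat - rem.toNat) (0 : Int)) 0
          (fun c hcm => by have := List.eq_of_mem_replicate hcm; omega)
          (fun c hcm => List.eq_of_mem_replicate hcm)
          (by simpa using hCz)
        rw [hCz]
        simpa [hsum1, ← hCz, hClen] using this
    · -- apps > 0, nodes < 0 : no node is placed, both sides are the untouched empty sets
      rw [not_le] at hn
      have hzr : PySem.List.pyRange 0 nodes 1 = [] := PySem.List.pyRange_one_eq_nil (by omega)
      show pvFill _ (PySem.List.pyRange 0 nodes 1) _ 0 = sequential_placement_alt nodes apps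
      unfold sequential_placement_alt
      rw [hdm]
      show pvFill _ (PySem.List.pyRange 0 nodes 1) _ 0
        = pvPlace base rem (rem * (base + 1)) (PySem.List.pyRange 0 nodes 1)
            ((PySem.List.pyRange 0 apps 1).map (fun _ => ([] : List Int)))
      rw [hzr]
      rfl
  · -- apps < 0 (and nodes ≤ 0): both sides are []
    have h1 : PySem.List.pyRange 0 apps 1 = [] := PySem.List.pyRange_one_eq_nil (by omega)
    have h2 : PySem.List.pyRange 0 nodes 1 = [] := PySem.List.pyRange_one_eq_nil (by omega)
    have h3 : apps.toNat = 0 := by omega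
    simp [sequential_placement, sequential_placement_alt, h1, h2, h3, pvBump, pvFill, pvPlace,
      PySem.Int.divmod?, show apps ≠ 0 by omega]
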